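-- pv_equiv track=rewrite | github.com/Karlenkko/DD2424-project | utils.py | cleaning_without_space
-- ===== SOURCE A (Python) =====
-- def cleaning_without_space(text):
--     word_buffer = ''
--     delimiter = {'\n', ' ', '!', '$', '&', "'", ',', '-', '.', ':', ';', '?'}
--     filtered = []
--     for i in text:
--         if i in delimiter:
--             if word_buffer != '':
--                 filtered.append(word_buffer)
--             if i == "'":
--                 word_buffer = "'"
--             else:
--                 if i != ' ':
--                     filtered.append(i)
--                 word_buffer = ''
--         else:
--             word_buffer += i
--     if word_buffer != '':
--         filtered.append(word_buffer)
--     return filtered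
-- ===== SOURCE B (Python) =====
-- def cleaning_without_space(text):
--     # Maximal-munch tokenizer: emit one token per step (a delimiter char,
--     # or a run starting with "'" / a non-delimiter extended over non-delimiters).
--     delims = set("\n !$&',-.:;?")
--     out = []
--     i, n = 0, len(text)
--     while i < n:
--         c = text[i]
--         if c == ' ':
--             i += 1
--         elif c in delims and c != "'":
--             out.append(c)
--             i += 1
--         else:
--             j = i + 1
--             while j < n and text[j] not in delims:
--                 j += 1
--             out.append(text[i:j])
--             i = j
--     return out
-- ===== Notes on version B (the rewrite author's own statement) =====
-- stated objective: simpler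
-- what changed: Replaced A's char-by-char state machine carrying a word buffer across iterations with a maximal-munch tokenizer that emits one whole token per outer step (skip space, single delimiter char, or a slice covering the maximal run of non-delimiters).
import Mathlib
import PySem

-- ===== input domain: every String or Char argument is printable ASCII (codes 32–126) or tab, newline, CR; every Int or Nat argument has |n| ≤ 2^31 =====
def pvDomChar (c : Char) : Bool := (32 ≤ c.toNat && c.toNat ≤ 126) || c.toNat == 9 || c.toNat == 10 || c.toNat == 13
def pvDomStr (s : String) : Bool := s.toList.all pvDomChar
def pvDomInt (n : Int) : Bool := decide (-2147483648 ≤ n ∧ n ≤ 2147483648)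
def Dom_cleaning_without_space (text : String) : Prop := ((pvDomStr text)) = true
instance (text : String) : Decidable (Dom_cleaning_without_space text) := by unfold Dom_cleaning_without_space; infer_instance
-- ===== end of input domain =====

-- B replaces A's char-by-char buffer state machine by a maximal-munch tokenizer
-- that emits one whole token per step (objective: simpler decomposition, same cost).

-- the delimiter set shared by both programs
def pvDelims : List Char := ['\n', ' ', '!', '$', '&', '\'', ',', '-', '.', ':', ';', '?']

-- ===== PORT A =====
-- A's loop: state = (word buffer, list of emitted tokens); literal transliteration.
def pvALoop : List Char → List Char → List String → List String
  | [], buf, acc => acc ++ (if buf = [] then [] else [String.mk buf])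
  | c :: rest, buf, acc =>
    if c ∈ pvDelims then
      let acc' := acc ++ (if buf = [] then [] else [String.mk buf])
      if c = '\'' then pvALoop rest ['\''] acc'
      else if c = ' ' then pvALoop rest [] acc'
      else pvALoop rest [] (acc' ++ [String.mk [c]])
    else pvALoop rest (buf ++ [c]) acc

def cleaning_without_space (text : String) : List String :=
  pvALoop text.toList [] []

-- ===== PORT B =====
-- B's loop: skip spaces; a non-apostrophe delimiter is its own token; otherwise
-- consume the maximal run of non-delimiters after the first char as one token.
def pvBLoop : List Char → List String
  | [] => []
  | c :: rest =>
    if c = ' ' then pvBLoop rest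
    else if c ∈ pvDelims ∧ c ≠ '\'' then String.mk [c] :: pvBLoop rest
    else
      String.mk (c :: rest.takeWhile (fun x => x ∉ pvDelims)) ::
        pvBLoop (rest.dropWhile (fun x => x ∉ pvDelims))
  termination_by l => l.length
  decreasing_by
    · simp
    · simp
    · exact Nat.lt_succ_of_le (List.length_dropWhile_le _ _)

def cleaning_without_space_alt (text : String) : List String :=
  pvBLoop text.toList

-- ===== PRECONDITION & SPEC =====
def Spec_cleaning_without_space (text : String) (out : List String) : Prop := out = cleaning_without_space_alt text
instance (text : String) (out : List String) : Decidable (Spec_cleaning_without_space text out) := by unfold Spec_cleaning_without_space; infer_instance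

-- ===== CLAIM (what is proved, stated in full; the proofs are below) =====
def Claim_equal_cleaning_without_space : Prop := ∀ (text : String), Dom_cleaning_without_space text → Spec_cleaning_without_space text (cleaning_without_space text)

-- ===== LEMMAS AND PROOFS =====

-- A's loop with a nonempty buffer: it keeps extending the buffer over the maximal
-- run of non-delimiters, then behaves like B on the remainder.
theorem pvALoop_eq (l : List Char) :
    ∀ (buf : List Char) (acc : List String),
      pvALoop l buf acc =
        acc ++ (if buf = [] then pvBLoop l
                else String.mk (buf ++ l.takeWhile (fun x => x ∉ pvDelims)) ::
                       pvBLoop (l.dropWhile (fun x => x ∉ pvDelims))) := by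
  induction l with
  | nil =>
    intro buf acc
    by_cases h : buf = [] <;> simp [pvALoop, pvBLoop, h]
  | cons c rest ih =>
    intro buf acc
    by_cases hd : c ∈ pvDelims
    · by_cases hq : c = '\''
      · subst hq
        by_cases hb : buf = [] <;>
          simp [pvALoop, hd, hb, ih, pvBLoop]
      · by_cases hs : c = ' '
        · subst hs
          by_cases hb : buf = [] <;>
            simp [pvALoop, hd, hb, hq, ih, pvBLoop]
        · by_cases hb : buf = [] <;>
            simp [pvALoop, hd, hb, hq, hs, ih, pvBLoop]
    · have hs : c ≠ ' ' := by intro h; exact hd (by simp [h, pvDelims])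
      by_cases hb : buf = [] <;>
        simp [pvALoop, hd, hb, hs, ih, pvBLoop]

-- ===== VERDICT (by name: the statement is the Claim_ definition above) =====
theorem cleaning_without_space_spec : Claim_equal_cleaning_without_space := by
  intro text _
  unfold Spec_cleaning_without_space cleaning_without_space cleaning_without_space_alt
  simp [pvALoop_eq]
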